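-- pv_equiv track=rewrite | github.com/viv-tech/ai-engineering-from-scratch | phases/12-multimodal-ai/04-flamingo-gated-cross-attention/code/main.py | interleaved_mask
-- ===== SOURCE A (Python) =====
-- def interleaved_mask(sequence: list[str]) -> list[list[bool]]:
--     """Build a cross-attn mask where each text token attends only to the most
--     recent preceding image.
--     sequence: labels like ['IMG0', 'txt0a', 'txt0b', 'IMG1', 'txt1a', 'txt1b'].
--     returns a mask over (text tokens) x (image tokens) with True = allowed.
--     """
--     text_positions = [i for i, s in enumerate(sequence) if not s.startswith("IMG")]
--     image_positions = [i for i, s in enumerate(sequence) if s.startswith("IMG")]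
--
--     mask = [[False] * len(image_positions) for _ in text_positions]
--     for ti, tpos in enumerate(text_positions):
--         preceding = [i for i in image_positions if i < tpos]
--         if not preceding:
--             continue
--         most_recent_img = preceding[-1]
--         img_index = image_positions.index(most_recent_img)
--         mask[ti][img_index] = True
--     return mask
-- ===== SOURCE B (Python) =====
-- def interleaved_mask(sequence: list[str]) -> list[list[bool]]:
--     """Single left-to-right pass: count images seen so far; each text token's
--     row is all-False with True at column (seen-1) when any image precedes it."""
--     n_img = 0
--     for s in sequence:
--         if s.startswith("IMG"):
--             n_img += 1
--     mask = []
--     seen = 0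
--     for s in sequence:
--         if s.startswith("IMG"):
--             seen += 1
--         else:
--             row = [False] * n_img
--             if seen:
--                 row[seen - 1] = True
--             mask.append(row)
--     return mask
-- ===== Notes on version B (the rewrite author's own statement) =====
-- stated objective: faster
-- what changed: Replaces A's per-text-token inner scans (filter image_positions by < tpos, then list.index) with a single left-to-right pass that maintains a running count of images seen, writing True directly at column seen-1.
import Mathlib
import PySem

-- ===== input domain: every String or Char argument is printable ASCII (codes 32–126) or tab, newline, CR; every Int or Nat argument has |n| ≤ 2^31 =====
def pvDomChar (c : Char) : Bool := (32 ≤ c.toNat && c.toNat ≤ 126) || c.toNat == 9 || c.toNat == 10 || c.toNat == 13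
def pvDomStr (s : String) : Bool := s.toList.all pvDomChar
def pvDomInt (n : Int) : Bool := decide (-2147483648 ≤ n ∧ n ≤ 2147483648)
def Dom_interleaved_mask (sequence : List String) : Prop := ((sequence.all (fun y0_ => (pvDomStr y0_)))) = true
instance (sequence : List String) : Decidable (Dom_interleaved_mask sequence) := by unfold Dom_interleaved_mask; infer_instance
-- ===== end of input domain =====

-- B replaces A's per-text-token inner scans over image_positions with ONE left-to-right
-- pass keeping a running count of images seen (column index = count - 1).

-- shared helper: s.startswith("IMG")
def pvIsImg (s : String) : Bool := PySem.Str.startswith s "IMG"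

-- ===== PORT A =====
def interleaved_mask (sequence : List String) : List (List Bool) :=
  let text_positions : List Int :=
    ((PySem.List.enumerate sequence 0).filter (fun p => !pvIsImg p.2)).map (fun p => p.1)
  let image_positions : List Int :=
    ((PySem.List.enumerate sequence 0).filter (fun p => pvIsImg p.2)).map (fun p => p.1)
  let mask0 : List (List Bool) :=
    text_positions.map (fun _ => List.replicate image_positions.length false)
  (PySem.List.enumerate text_positions 0).foldl (fun mask p =>
      let preceding := image_positions.filter (fun i => decide (i < p.2))
      match preceding.getLast? with
      | none => mask                                   -- 'continue'
      | some most_recent_img =>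
        match PySem.List.index? image_positions most_recent_img with
        | none => mask                                 -- unreachable (list.index of a member)
        | some img_index =>
          PySem.List.pySetD mask p.1
            ((PySem.List.pyGetD mask p.1 []).set img_index true)) mask0

-- ===== PORT B =====
def interleaved_mask_alt (sequence : List String) : List (List Bool) :=
  let n_img : Nat := sequence.foldl (fun n s => if pvIsImg s then n + 1 else n) 0
  (sequence.foldl (fun (st : Nat × List (List Bool)) s =>
      if pvIsImg s then (st.1 + 1, st.2)
      else
        let row := List.replicate n_img false
        let row := if st.1 ≠ 0 then row.set (st.1 - 1) true else row
        (st.1, st.2 ++ [row])) (0, [])).2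

-- ===== PRECONDITION & SPEC =====
def Spec_interleaved_mask (sequence : List String) (out : List (List Bool)) : Prop := out = interleaved_mask_alt sequence
instance (sequence : List String) (out : List (List Bool)) : Decidable (Spec_interleaved_mask sequence out) := by unfold Spec_interleaved_mask; infer_instance

-- ===== CLAIM (what is proved, stated in full; the proofs are below) =====
def Claim_equal_interleaved_mask : Prop := ∀ (sequence : List String), Dom_interleaved_mask sequence → Spec_interleaved_mask sequence (interleaved_mask sequence)

-- ===== LEMMAS AND PROOFS =====

-- the row a text token gets when c images precede it (out of n total images)
def pvRow (n c : Nat) : List Bool :=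
  if c ≠ 0 then (List.replicate n false).set (c - 1) true else List.replicate n false

-- image positions of the suffix, counting from offset k
def pvImgPos (k : Int) : List String → List Int
  | [] => []
  | s :: rest => if pvIsImg s then k :: pvImgPos (k + 1) rest else pvImgPos (k + 1) rest

-- text positions
def pvTxtPos (k : Int) : List String → List Int
  | [] => []
  | s :: rest => if pvIsImg s then pvTxtPos (k + 1) rest else k :: pvTxtPos (k + 1) rest

-- running image counts at each text token
def pvCounts (c : Nat) : List String → List Nat
  | [] => []
  | s :: rest => if pvIsImg s then pvCounts (c + 1) rest else c :: pvCounts c rest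

lemma pvImgPos_eq (seq : List String) : ∀ k,
    pvImgPos k seq = ((PySem.List.enumerate seq k).filter (fun p => pvIsImg p.2)).map (fun p => p.1) := by
  induction seq with
  | nil => intro k; rfl
  | cons s rest ih =>
      intro k
      simp only [PySem.List.enumerate_cons, List.filter_cons, pvImgPos]
      by_cases h : pvIsImg s <;> simp [h, ih]

lemma pvTxtPos_eq (seq : List String) : ∀ k,
    pvTxtPos k seq = ((PySem.List.enumerate seq k).filter (fun p => !pvIsImg p.2)).map (fun p => p.1) := by
  induction seq with
  | nil => intro k; rfl
  | cons s rest ih =>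
      intro k
      simp only [PySem.List.enumerate_cons, List.filter_cons, pvTxtPos]
      by_cases h : pvIsImg s <;> simp [h, ih]

lemma pvImgPos_ge (seq : List String) : ∀ k x, x ∈ pvImgPos k seq → k ≤ x := by
  induction seq with
  | nil => intro k x h; simp [pvImgPos] at h
  | cons s rest ih =>
      intro k x h
      simp only [pvImgPos] at h
      by_cases hs : pvIsImg s
      · simp [hs] at h
        rcases h with h | h
        · omega
        · have := ih (k + 1) x h; omega
      · simp [hs] at h
        have := ih (k + 1) x h; omega

lemma pvImgPos_sorted (seq : List String) : ∀ k, (pvImgPos k seq).Pairwise (· < ·) := by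
  induction seq with
  | nil => intro k; simp [pvImgPos]
  | cons s rest ih =>
      intro k
      simp only [pvImgPos]
      by_cases hs : pvIsImg s
      · simp only [hs, if_true]
        exact List.pairwise_cons.2 ⟨fun x hx => by have := pvImgPos_ge rest (k + 1) x hx; omega, ih (k + 1)⟩
      · simpa [hs] using ih (k + 1)

lemma pvImgPos_length (seq : List String) : ∀ k,
    (pvImgPos k seq).length = (seq.filter pvIsImg).length := by
  induction seq with
  | nil => intro k; rfl
  | cons s rest ih =>
      intro k
      simp only [pvImgPos, List.filter_cons]
      by_cases hs : pvIsImg s <;> simp [hs, ih]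

-- on a strictly increasing list, the last preceding image sits at index (count of preceding) - 1
lemma pvLast_index (P : List Int) (hP : P.Pairwise (· < ·)) (t v : Int)
    (hv : (P.filter (fun i => decide (i < t))).getLast? = some v) :
    PySem.List.index? P v = some ((P.filter (fun i => decide (i < t))).length - 1) := by
  induction P with
  | nil => simp at hv
  | cons p rest ih =>
      have hrest : rest.Pairwise (· < ·) := (List.pairwise_cons.1 hP).2
      have hlt : ∀ x ∈ rest, p < x := (List.pairwise_cons.1 hP).1
      by_cases hp : p < t
      · simp only [List.filter_cons, hp, decide_true, if_true] at hv ⊢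
        cases hrf : (rest.filter (fun i => decide (i < t))).getLast? with
        | none =>
            have : rest.filter (fun i => decide (i < t)) = [] := by
              cases h : rest.filter (fun i => decide (i < t)) with
              | nil => rfl
              | cons a l => rw [h] at hrf; simp at hrf
            rw [List.getLast?_cons, hrf] at hv
            simp at hv
            subst hv
            rw [PySem.List.index?_cons_self]
            simp [this]
        | some w =>
            rw [List.getLast?_cons, hrf] at hv
            simp at hv
            subst hv
            have hwmem : w ∈ rest := List.mem_of_mem_filter (List.mem_of_getLast? hrf)
            have hne : p ≠ w := ne_of_lt (hlt w hwmem)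
            rw [PySem.List.index?_cons_of_ne rest hne, ih hrest hrf]
            have hpos : 0 < (rest.filter (fun i => decide (i < t))).length := by
              have : w ∈ rest.filter (fun i => decide (i < t)) := List.mem_of_getLast? hrf
              exact List.length_pos_of_mem this
            simp
            omega
      · exfalso
        have hnone : (p :: rest).filter (fun i => decide (i < t)) = [] := by
          rw [List.filter_eq_nil_iff]
          intro a ha
          rcases List.mem_cons.1 ha with rfl | ha'
          · simpa using hp
          · have := hlt a ha'; simp; omega
        rw [hnone] at hv; simp at hv

-- empty filter ↔ no preceding image
lemma pvFilter_nil_iff (P : List Int) (t : Int) :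
    (P.filter (fun i => decide (i < t))).getLast? = none ↔ (P.filter (fun i => decide (i < t))).length = 0 := by
  cases P.filter (fun i => decide (i < t)) with
  | nil => simp
  | cons a l => simp

-- A's loop: setting row ti (an enumerate index) of a mapped initial mask, row by row
lemma pvFoldl_set (h : Int → Option (List Bool → List Bool)) (g : Int → List Bool) :
    ∀ (xs : List Int) (pre : List (List Bool)),
    (PySem.List.enumerate xs (pre.length)).foldl (fun mask p =>
        match h p.2 with
        | none => mask
        | some upd => PySem.List.pySetD mask p.1 (upd (PySem.List.pyGetD mask p.1 [])))
      (pre ++ xs.map g)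
    = pre ++ xs.map (fun x => match h x with | none => g x | some upd => upd (g x)) := by
  intro xs
  induction xs with
  | nil => intro pre; simp [PySem.List.enumerate_nil]
  | cons x rest ih =>
      intro pre
      rw [PySem.List.enumerate_cons]
      simp only [List.map_cons, List.foldl_cons]
      cases hx : h x with
      | none =>
          have := ih (pre ++ [g x])
          simp only [List.length_append, List.length_singleton] at this
          have hcast : ((pre.length : Int) + 1) = ((pre.length + 1 : Nat) : Int) := by push_cast; ring
          rw [show pre ++ g x :: rest.map g = (pre ++ [g x]) ++ rest.map g by simp,
              hcast, this]
          simp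
      | some upd =>
          have hget : PySem.List.pyGetD (pre ++ g x :: rest.map g) (pre.length : Int) [] = g x := by
            rw [PySem.List.pyGetD_natCast]
            simp [List.getD]
          have hset : PySem.List.pySetD (pre ++ g x :: rest.map g) (pre.length : Int) (upd (g x))
              = (pre ++ [upd (g x)]) ++ rest.map g := by
            rw [PySem.List.pySetD_natCast]
            rw [List.set_append_right _ _ (le_refl pre.length)]
            simp
          dsimp only
          rw [hget, hset]
          have := ih (pre ++ [upd (g x)])
          simp only [List.length_append, List.length_singleton] at this
          have hcast : ((pre.length : Int) + 1) = ((pre.length + 1 : Nat) : Int) := by push_cast; ring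
          rw [hcast, this]
          simp

-- the per-token row of A equals pvRow of the preceding-image count
lemma pvRowA_eq (P : List Int) (hP : P.Pairwise (· < ·)) (t : Int) :
    (match (P.filter (fun i => decide (i < t))).getLast? with
     | none => List.replicate P.length false
     | some v =>
       match PySem.List.index? P v with
       | none => List.replicate P.length false
       | some idx => (List.replicate P.length false).set idx true)
    = pvRow P.length ((P.filter (fun i => decide (i < t))).length) := by
  cases hv : (P.filter (fun i => decide (i < t))).getLast? with
  | none =>
      have h0 := (pvFilter_nil_iff P t).1 hv
      simp [pvRow, h0]
  | some v =>
      dsimp only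
      rw [pvLast_index P hP t v hv]
      have hpos : 0 < (P.filter (fun i => decide (i < t))).length := by
        have : v ∈ P.filter (fun i => decide (i < t)) := List.mem_of_getLast? hv
        exact List.length_pos_of_mem this
      simp only [pvRow]
      rw [if_pos (by omega)]

-- text positions mapped through "count of preceding images" = the running counts
lemma pvMap_counts (seq : List String) : ∀ (k : Int) (pfx : List Int),
    (∀ a ∈ pfx, a < k) →
    (pvTxtPos k seq).map (fun t => ((pfx ++ pvImgPos k seq).filter (fun i => decide (i < t))).length)
      = pvCounts pfx.length seq := by
  induction seq with
  | nil => intro k pfx _; rfl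
  | cons s rest ih =>
      intro k pfx hpfx
      by_cases hs : pvIsImg s
      · simp only [pvTxtPos, pvImgPos, pvCounts, hs, if_true]
        have : pfx ++ k :: pvImgPos (k + 1) rest = (pfx ++ [k]) ++ pvImgPos (k + 1) rest := by simp
        rw [this]
        have := ih (k + 1) (pfx ++ [k]) (by
          intro a ha
          rcases List.mem_append.1 ha with h | h
          · have := hpfx a h; omega
          · simp at h; omega)
        simpa using this
      · simp only [pvTxtPos, pvImgPos, pvCounts, hs, Bool.false_eq_true, if_false, List.map_cons]
        congr 1
        · -- head: count of elements < k is exactly pfx.length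
          have h1 : pfx.filter (fun i => decide (i < k)) = pfx :=
            List.filter_eq_self.2 (fun a ha => by simpa using hpfx a ha)
          have h2 : (pvImgPos (k + 1) rest).filter (fun i => decide (i < k)) = [] := by
            rw [List.filter_eq_nil_iff]
            intro a ha
            have := pvImgPos_ge rest (k + 1) a ha
            simp; omega
          rw [List.filter_append, h1, h2]
          simp
        · exact ih (k + 1) pfx (fun a ha => by have := hpfx a ha; omega)

-- B's counting loop is the filter length
lemma pvCountB (seq : List String) : ∀ (n : Nat),
    seq.foldl (fun n s => if pvIsImg s then n + 1 else n) n = n + (seq.filter pvIsImg).length := by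
  induction seq with
  | nil => intro n; simp
  | cons s rest ih =>
      intro n
      simp only [List.foldl_cons, List.filter_cons]
      by_cases hs : pvIsImg s <;> simp [hs, ih] <;> try omega

-- B's main loop appends pvRow n c for each running count c
lemma pvFoldB (n : Nat) (seq : List String) : ∀ (c : Nat) (acc : List (List Bool)),
    (seq.foldl (fun (st : Nat × List (List Bool)) s =>
        if pvIsImg s then (st.1 + 1, st.2)
        else
          let row := List.replicate n false
          let row := if st.1 ≠ 0 then row.set (st.1 - 1) true else row
          (st.1, st.2 ++ [row])) (c, acc)).2
    = acc ++ (pvCounts c seq).map (pvRow n) := by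
  induction seq with
  | nil => intro c acc; simp [pvCounts]
  | cons s rest ih =>
      intro c acc
      rw [List.foldl_cons]
      by_cases hs : pvIsImg s
      · simp only [hs, if_true, pvCounts]
        exact ih (c + 1) acc
      · simp only [hs, Bool.false_eq_true, if_false, pvCounts]
        rw [ih]
        simp [pvRow]

-- ===== VERDICT (by name: the statement is the Claim_ definition above) =====
theorem interleaved_mask_spec : Claim_equal_interleaved_mask := by
  intro seq _
  unfold Spec_interleaved_mask interleaved_mask interleaved_mask_alt
  simp only []
  rw [← pvImgPos_eq seq 0, ← pvTxtPos_eq seq 0]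
  -- A side: rewrite the foldl via pvFoldl_set with h/g
  have hA := pvFoldl_set
      (fun t => match ((pvImgPos 0 seq).filter (fun i => decide (i < t))).getLast? with
        | none => none
        | some v =>
          match PySem.List.index? (pvImgPos 0 seq) v with
          | none => none
          | some idx => some (fun row : List Bool => row.set idx true))
      (fun _ => List.replicate (pvImgPos 0 seq).length false)
      (pvTxtPos 0 seq) []
  simp only [List.length_nil, Nat.cast_zero, List.nil_append] at hA
  have hstep : (fun (mask : List (List Bool)) (p : Int × Int) =>
      let preceding := (pvImgPos 0 seq).filter (fun i => decide (i < p.2))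
      match preceding.getLast? with
      | none => mask
      | some most_recent_img =>
        match PySem.List.index? (pvImgPos 0 seq) most_recent_img with
        | none => mask
        | some img_index =>
          PySem.List.pySetD mask p.1 ((PySem.List.pyGetD mask p.1 []).set img_index true))
    = (fun (mask : List (List Bool)) (p : Int × Int) =>
        match (fun t => match ((pvImgPos 0 seq).filter (fun i => decide (i < t))).getLast? with
          | none => none
          | some v =>
            match PySem.List.index? (pvImgPos 0 seq) v with
            | none => none
            | some idx => some (fun row : List Bool => row.set idx true)) p.2 with
        | none => mask
        | some upd => PySem.List.pySetD mask p.1 (upd (PySem.List.pyGetD mask p.1 []))) := by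
    funext mask p
    simp only [PySem.List.index?_eq_idxOf?]
    cases hl : ((pvImgPos 0 seq).filter (fun i => decide (i < p.2))).getLast? with
    | none => rfl
    | some v =>
        dsimp only
        cases List.idxOf? v (pvImgPos 0 seq) with
        | none => rfl
        | some idx => rfl
  rw [hstep, hA]
  -- both sides are maps over text tokens; identify rows
  have hrows : (pvTxtPos 0 seq).map (fun t =>
      match (fun t => match ((pvImgPos 0 seq).filter (fun i => decide (i < t))).getLast? with
        | none => none
        | some v =>
          match PySem.List.index? (pvImgPos 0 seq) v with
          | none => none
          | some idx => some (fun row : List Bool => row.set idx true)) t with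
      | none => List.replicate (pvImgPos 0 seq).length false
      | some upd => upd (List.replicate (pvImgPos 0 seq).length false))
    = (pvTxtPos 0 seq).map (fun t =>
        pvRow (pvImgPos 0 seq).length (((pvImgPos 0 seq).filter (fun i => decide (i < t))).length)) := by
    apply List.map_congr_left
    intro t _
    have h := pvRowA_eq (pvImgPos 0 seq) (pvImgPos_sorted seq 0) t
    simp only [PySem.List.index?_eq_idxOf?] at h ⊢
    cases hl : ((pvImgPos 0 seq).filter (fun i => decide (i < t))).getLast? with
    | none => simpa [hl] using h
    | some v =>
        simp only [hl] at h ⊢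
        cases hi : List.idxOf? v (pvImgPos 0 seq) with
        | none => simpa [hi] using h
        | some idx => simpa [hi] using h
  rw [hrows]
  -- B side
  rw [pvFoldB, pvCountB]
  simp only [Nat.zero_add, List.nil_append]
  rw [← pvImgPos_length seq 0]
  have hm := pvMap_counts seq 0 [] (by simp)
  simp only [List.nil_append, List.length_nil] at hm
  rw [← hm, List.map_map]
  rfl
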